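-- pv_equiv track=rewrite | github.com/yveskleny/TIA | lista_estrutura_de_dados/ex-06.py | validador_de_caminho_de_cursos
-- ===== SOURCE A (Python) =====
-- def validador_de_caminho_de_cursos(prerequisitos, caminho_proposto):
--     cursadas = []
--
--     for curso in caminho_proposto:
--         if curso not in prerequisitos:
--             cursadas.append(curso)
--         else:
--             for requisito in prerequisitos[curso]:
--                 if requisito not in cursadas:
--                     return False
--             cursadas.append(curso)
--
--     return True
-- ===== SOURCE B (Python) =====
-- def validador_de_caminho_de_cursos(prerequisitos, caminho_proposto):
--     first_index = {}
--     for i, curso in enumerate(caminho_proposto):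
--         if curso not in first_index:
--             first_index[curso] = i
--     for i, curso in enumerate(caminho_proposto):
--         if curso in prerequisitos:
--             for requisito in prerequisitos[curso]:
--                 j = first_index.get(requisito)
--                 if j is None or j >= i:
--                     return False
--     return True
-- ===== Notes on version B (the rewrite author's own statement) =====
-- stated objective: alternative
-- what changed: Replaces the incrementally grown 'cursadas' list (with a linear membership scan per prerequisite) by a precomputed first-occurrence index dict built in one pass, so each prerequisite check becomes one dict lookup plus an index comparison.
import Mathlib
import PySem

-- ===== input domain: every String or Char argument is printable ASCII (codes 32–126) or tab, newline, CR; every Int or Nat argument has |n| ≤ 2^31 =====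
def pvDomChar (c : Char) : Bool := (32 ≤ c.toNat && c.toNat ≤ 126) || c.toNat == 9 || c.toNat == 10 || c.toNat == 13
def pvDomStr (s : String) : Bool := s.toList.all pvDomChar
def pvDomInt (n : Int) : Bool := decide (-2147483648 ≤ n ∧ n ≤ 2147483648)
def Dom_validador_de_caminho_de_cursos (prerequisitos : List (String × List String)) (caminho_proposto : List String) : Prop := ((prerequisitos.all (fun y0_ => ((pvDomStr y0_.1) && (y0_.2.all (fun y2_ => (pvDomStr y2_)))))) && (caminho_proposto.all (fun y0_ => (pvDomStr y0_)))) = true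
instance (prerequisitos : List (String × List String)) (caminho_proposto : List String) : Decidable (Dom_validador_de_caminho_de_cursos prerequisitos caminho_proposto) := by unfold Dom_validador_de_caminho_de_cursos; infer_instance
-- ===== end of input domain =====

-- B replaces A's growing 'cursadas' list by a precomputed first-occurrence index table
-- plus an index comparison per prerequisite (alternative decomposition, same exact behaviour).

-- ===== PORT A =====
-- A's loop: walk the path, keeping the list of already-taken courses; on a course with
-- prerequisites, every prerequisite must already be in that list.
def pvA_go (pre : List (String × List String)) : List String → List String → Bool
  | [], _ => true
  | c :: rest, cursadas =>
    match pre.find? (fun p => p.1 == c) with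
    | none => pvA_go pre rest (cursadas ++ [c])
    | some pr =>
      if pr.2.all (fun r => cursadas.contains r) then pvA_go pre rest (cursadas ++ [c])
      else false

def validador_de_caminho_de_cursos (prerequisitos : List (String × List String)) (caminho_proposto : List String) : Bool :=
  pvA_go prerequisitos caminho_proposto []

-- ===== PORT B =====
-- first pass: first-occurrence index of every course in the path
def pvB_firstIdx : List String → Nat → PySem.Dict String Nat → PySem.Dict String Nat
  | [], _, d => d
  | c :: rest, i, d =>
    pvB_firstIdx rest (i + 1) (if (d.get? c).isSome then d else d.insert c i)

-- second pass: every prerequisite must have a first occurrence strictly before position i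
def pvB_check (pre : List (String × List String)) (d : PySem.Dict String Nat) : List String → Nat → Bool
  | [], _ => true
  | c :: rest, i =>
    match pre.find? (fun p => p.1 == c) with
    | none => pvB_check pre d rest (i + 1)
    | some pr =>
      if pr.2.all (fun r => match d.get? r with
                            | none => false
                            | some j => j < i) then pvB_check pre d rest (i + 1)
      else false

def validador_de_caminho_de_cursos_alt (prerequisitos : List (String × List String)) (caminho_proposto : List String) : Bool :=
  pvB_check prerequisitos (pvB_firstIdx caminho_proposto 0 PySem.Dict.empty) caminho_proposto 0

-- ===== PRECONDITION & SPEC =====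
def Spec_validador_de_caminho_de_cursos (prerequisitos : List (String × List String)) (caminho_proposto : List String) (out : Bool) : Prop := out = validador_de_caminho_de_cursos_alt prerequisitos caminho_proposto
instance (prerequisitos : List (String × List String)) (caminho_proposto : List String) (out : Bool) : Decidable (Spec_validador_de_caminho_de_cursos prerequisitos caminho_proposto out) := by unfold Spec_validador_de_caminho_de_cursos; infer_instance

-- ===== CLAIM (what is proved, stated in full; the proofs are below) =====
def Claim_equal_validador_de_caminho_de_cursos : Prop := ∀ (prerequisitos : List (String × List String)) (caminho_proposto : List String), Dom_validador_de_caminho_de_cursos prerequisitos caminho_proposto → Spec_validador_de_caminho_de_cursos prerequisitos caminho_proposto (validador_de_caminho_de_cursos prerequisitos caminho_proposto)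

-- ===== LEMMAS AND PROOFS =====

/-- Characterisation of the first-occurrence table built by `pvB_firstIdx`. -/
lemma firstIdx_get? (r : String) : ∀ (l : List String) (k : Nat) (d : PySem.Dict String Nat),
    (pvB_firstIdx l k d).get? r =
      match d.get? r with
      | some j => some j
      | none => if r ∈ l then some (k + l.idxOf r) else none := by
  intro l
  induction l with
  | nil =>
    intro k d
    simp [pvB_firstIdx]
    cases d.get? r <;> simp
  | cons c rest ih =>
    intro k d
    simp only [pvB_firstIdx]
    by_cases hc : (d.get? c).isSome
    · simp only [hc, if_pos]
      rw [ih]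
      cases hdr : d.get? r with
      | some j => simp
      | none =>
        by_cases hrc : r = c
        · subst hrc; rw [hdr] at hc; simp at hc
        · simp only [List.mem_cons, hrc, false_or]
          rw [List.idxOf_cons_ne _ (Ne.symm hrc)]
          by_cases hm : r ∈ rest <;> simp [hm] <;> omega
    · simp only [hc, if_neg, Bool.not_eq_true]
      rw [ih]
      by_cases hrc : r = c
      · subst hrc
        rw [PySem.Dict.get?_insert_self]
        cases hdr : d.get? r with
        | some j => rw [hdr] at hc; simp at hc
        | none => simp [List.idxOf_cons_eq _ rfl]
      · rw [PySem.Dict.get?_insert_of_ne _ _ hrc]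
        cases hdr : d.get? r with
        | some j => simp
        | none =>
          simp only [List.mem_cons, hrc, false_or]
          rw [List.idxOf_cons_ne _ (Ne.symm hrc)]
          by_cases hm : r ∈ rest <;> simp [hm] <;> omega

/-- Membership in the processed prefix `acc` equals the table test B performs. -/
lemma mem_acc_iff_table (acc rest : List String) (r : String) :
    acc.contains r =
      (match (pvB_firstIdx (acc ++ rest) 0 PySem.Dict.empty).get? r with
       | none => false
       | some j => decide (j < acc.length)) := by
  rw [firstIdx_get? r (acc ++ rest) 0 PySem.Dict.empty]
  rw [PySem.Dict.get?_empty]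
  by_cases hm : r ∈ acc ++ rest
  · simp only [hm, if_pos]
    by_cases ha : r ∈ acc
    · have : (acc ++ rest).idxOf r < acc.length := by
        have := List.idxOf_lt_length_of_mem ha
        rwa [List.idxOf_append_of_mem ha]
      simp [ha, this]
    · have hb : r ∈ rest := by
        rcases List.mem_append.mp hm with h | h
        · exact absurd h ha
        · exact h
      have : ¬ (acc ++ rest).idxOf r < acc.length := by
        rw [List.idxOf_append_of_notMem ha]; omega
      simp [ha, this]
  · have ha : r ∉ acc := fun h => hm (List.mem_append.mpr (Or.inl h))
    simp [hm, ha]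

/-- Main invariant: A's recursion with accumulator `acc` agrees with B's indexed pass. -/
lemma go_eq_check (pre : List (String × List String)) (cam : List String) :
    ∀ (rest acc : List String), acc ++ rest = cam →
      pvA_go pre rest acc =
        pvB_check pre (pvB_firstIdx cam 0 PySem.Dict.empty) rest acc.length := by
  intro rest
  induction rest with
  | nil => intro acc _; simp [pvA_go, pvB_check]
  | cons c rest ih =>
    intro acc hacc
    simp only [pvA_go, pvB_check]
    have hnext : (acc ++ [c]) ++ rest = cam := by
      simpa [List.append_assoc] using hacc
    have hlen : (acc ++ [c]).length = acc.length + 1 := by simp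
    cases hfind : pre.find? (fun p => p.1 == c) with
    | none =>
      have := ih (acc ++ [c]) hnext
      rw [hlen] at this
      exact this
    | some pr =>
      have h2 := ih (acc ++ [c]) hnext
      rw [hlen] at h2
      have hfun : (fun r : String => acc.contains r)
          = (fun r => match (pvB_firstIdx cam 0 PySem.Dict.empty).get? r with
                      | none => false
                      | some j => decide (j < acc.length)) := by
        funext r
        have := mem_acc_iff_table acc (c :: rest) r
        rw [hacc] at this
        exact this
      show (if (pr.2.all fun r => acc.contains r) = true then pvA_go pre rest (acc ++ [c]) else false)
         = (if (pr.2.all fun r => match (pvB_firstIdx cam 0 PySem.Dict.empty).get? r with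
                                  | none => false
                                  | some j => decide (j < acc.length)) = true
            then pvB_check pre (pvB_firstIdx cam 0 PySem.Dict.empty) rest (acc.length + 1) else false)
      rw [← hfun]
      split_ifs with h
      · exact h2
      · rfl

-- ===== VERDICT (by name: the statement is the Claim_ definition above) =====
theorem validador_de_caminho_de_cursos_spec : Claim_equal_validador_de_caminho_de_cursos := by
  intro pre cam _
  unfold Spec_validador_de_caminho_de_cursos validador_de_caminho_de_cursos validador_de_caminho_de_cursos_alt
  simpa using go_eq_check pre cam cam [] (by simp)
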